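-- pv_equiv track=rewrite | github.com/Jlassi-Mohamed/Competitive-Programming-Solutions | LeetCode/Oct 2024 LeetCoding Challenge/1813. Sentence Similarity III.py | areSentencesSimilar
-- ===== SOURCE A (Python) =====
-- def areSentencesSimilar(sentence1: str, sentence2: str) -> bool:
--     s1 = sentence1.split()
--     s2 = sentence2.split()
--
--     if len(s1)<len(s2):
--         s1, s2 = s2, s1
--
--     n2 = len(s2)
--     n1 = len(s1)
--
--     start, end= 0, 0
--
--     while start<n2 and s1[start] == s2[start]:
--         start += 1
--
--     while end<n2 and s1[n1-1-end] == s2[n2-1-end]: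
--         end += 1
--
--     return start + end >= n2
-- ===== SOURCE B (Python) =====
-- def areSentencesSimilar(sentence1: str, sentence2: str) -> bool:
--     w1 = sentence1.split()
--     w2 = sentence2.split()
--     if len(w2) <= len(w1):
--         base, t = w1, w2
--     else:
--         base, t = w2, w1
--     nb, nt = len(base), len(t)
--     return any(base[:k] == t[:k] and base[nb - (nt - k):] == t[k:]
--                for k in range(nt + 1))
-- ===== Notes on version B (the rewrite author's own statement) =====
-- stated objective: alternative
-- what changed: B enumerates every prefix/suffix split point k of the shorter word list and checks the two slice equalities, instead of A's greedy two-pointer scan for the maximal matching prefix and suffix.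
import Mathlib
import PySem

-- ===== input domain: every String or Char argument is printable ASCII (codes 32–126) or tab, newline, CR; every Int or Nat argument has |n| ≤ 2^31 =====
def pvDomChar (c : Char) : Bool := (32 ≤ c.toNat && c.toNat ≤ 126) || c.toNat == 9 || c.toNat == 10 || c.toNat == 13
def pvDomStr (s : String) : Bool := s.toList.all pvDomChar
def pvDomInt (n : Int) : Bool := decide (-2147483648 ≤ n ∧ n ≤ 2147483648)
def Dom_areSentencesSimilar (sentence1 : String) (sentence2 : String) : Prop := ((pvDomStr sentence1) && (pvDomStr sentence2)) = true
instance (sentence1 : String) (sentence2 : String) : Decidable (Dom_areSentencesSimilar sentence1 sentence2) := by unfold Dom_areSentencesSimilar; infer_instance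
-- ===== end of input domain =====

-- B replaces A's greedy two-pointer prefix/suffix scan by enumerating every split
-- point k of the shorter word list and comparing the two slices (alternative algorithm).

-- ===== PORT A =====
-- `while start<n2 and s1[start] == s2[start]: start += 1` (indices always in range in A, so getD is exact)
def pvWhilePrefix (a b : List String) (n : Nat) (j : Nat) : Nat :=
  if _h : j < n ∧ a.getD j "" = b.getD j "" then pvWhilePrefix a b n (j + 1) else j
termination_by n - j
decreasing_by omega

-- `while end<n2 and s1[n1-1-end] == s2[n2-1-end]: end += 1` (indices always in range in A)
def pvWhileSuffix (a b : List String) (n1 n2 : Nat) (e : Nat) : Nat :=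
  if _h : e < n2 ∧ a.getD (n1 - 1 - e) "" = b.getD (n2 - 1 - e) "" then
    pvWhileSuffix a b n1 n2 (e + 1) else e
termination_by n2 - e
decreasing_by omega

def areSentencesSimilar (sentence1 : String) (sentence2 : String) : Bool :=
  let s1 := PySem.Str.split₀ sentence1
  let s2 := PySem.Str.split₀ sentence2
  -- `if len(s1)<len(s2): s1, s2 = s2, s1`
  let a := if s1.length < s2.length then s2 else s1
  let b := if s1.length < s2.length then s1 else s2
  let n2 := b.length
  let n1 := a.length
  let start := pvWhilePrefix a b n2 0
  let e := pvWhileSuffix a b n1 n2 0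
  decide (n2 ≤ start + e)

-- ===== PORT B =====
-- slices base[:k], base[m:] (0 ≤ k, m) are exactly take/drop
def areSentencesSimilar_alt (sentence1 : String) (sentence2 : String) : Bool :=
  let w1 := PySem.Str.split₀ sentence1
  let w2 := PySem.Str.split₀ sentence2
  let base := if w2.length ≤ w1.length then w1 else w2
  let t := if w2.length ≤ w1.length then w2 else w1
  let nb := base.length
  let nt := t.length
  (List.range (nt + 1)).any fun k =>
    (base.take k == t.take k) && (base.drop (nb - (nt - k)) == t.drop k)

-- ===== PRECONDITION & SPEC =====
def Spec_areSentencesSimilar (sentence1 : String) (sentence2 : String) (out : Bool) : Prop := out = areSentencesSimilar_alt sentence1 sentence2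
instance (sentence1 : String) (sentence2 : String) (out : Bool) : Decidable (Spec_areSentencesSimilar sentence1 sentence2 out) := by unfold Spec_areSentencesSimilar; infer_instance

-- ===== CLAIM (what is proved, stated in full; the proofs are below) =====
def Claim_equal_areSentencesSimilar : Prop := ∀ (sentence1 : String) (sentence2 : String), Dom_areSentencesSimilar sentence1 sentence2 → Spec_areSentencesSimilar sentence1 sentence2 (areSentencesSimilar sentence1 sentence2)

-- ===== LEMMAS AND PROOFS =====

-- pvWhilePrefix from j computes the first index ≥ j where the lists disagree (capped at n).
lemma pvWhilePrefix_spec (a b : List String) (n : Nat) :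
    ∀ fuel j, n - j ≤ fuel → j ≤ n →
      j ≤ pvWhilePrefix a b n j ∧ pvWhilePrefix a b n j ≤ n ∧
      (∀ i, j ≤ i → i < pvWhilePrefix a b n j → a.getD i "" = b.getD i "") ∧
      (pvWhilePrefix a b n j < n →
        a.getD (pvWhilePrefix a b n j) "" ≠ b.getD (pvWhilePrefix a b n j) "") := by
  intro fuel
  induction fuel with
  | zero =>
      intro j hf hj
      have hjn : j = n := by omega
      rw [pvWhilePrefix]
      simp [hjn]
      intro i h1 h2
      omega
  | succ m ih =>
      intro j hf hj
      rw [pvWhilePrefix]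
      split
      · rename_i h
        obtain ⟨h1, h2⟩ := h
        have := ih (j + 1) (by omega) (by omega)
        refine ⟨by omega, this.2.1, ?_, this.2.2.2⟩
        intro i hji hi
        rcases Nat.eq_or_lt_of_le hji with rfl | hlt
        · exact h2
        · exact this.2.2.1 i hlt hi
      · rename_i h
        push_neg at h
        exact ⟨le_refl _, hj, by omega, fun hn => h hn⟩

-- pvWhileSuffix is pvWhilePrefix on the reversed lists.
lemma pvWhileSuffix_eq_rev (a b : List String) (hb : b.length ≤ a.length) :
    ∀ fuel e, b.length - e ≤ fuel →
      pvWhileSuffix a b a.length b.length e = pvWhilePrefix a.reverse b.reverse b.length e := by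
  intro fuel
  induction fuel with
  | zero =>
      intro e hf
      rw [pvWhileSuffix, pvWhilePrefix]
      have : ¬ e < b.length := by omega
      simp [this]
  | succ m ih =>
      intro e hf
      rw [pvWhileSuffix, pvWhilePrefix]
      by_cases he : e < b.length
      · have ha' : a.reverse.getD e "" = a.getD (a.length - 1 - e) "" := by
          have h1 : e < a.length := by omega
          rw [List.getD_eq_getElem _ _ (by simpa using h1),
              List.getD_eq_getElem _ _ (by omega)]
          simp [List.getElem_reverse]
        have hb' : b.reverse.getD e "" = b.getD (b.length - 1 - e) "" := by
          rw [List.getD_eq_getElem _ _ (by simpa using he),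
              List.getD_eq_getElem _ _ (by omega)]
          simp [List.getElem_reverse]
        rw [ha', hb']
        split
        · exact ih (e + 1) (by omega)
        · rfl
      · simp [he]

-- list-slice equality on take expressed pointwise via getD
lemma take_eq_iff_getD (a b : List String) (k : Nat) (ha : k ≤ a.length) (hb : k ≤ b.length) :
    a.take k = b.take k ↔ ∀ i < k, a.getD i "" = b.getD i "" := by
  constructor
  · intro h i hi
    have hia : i < a.length := lt_of_lt_of_le hi ha
    have hib : i < b.length := lt_of_lt_of_le hi hb
    have h2 : a[i]? = b[i]? := by
      have := congrArg (fun l => l[i]?) h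
      simpa [List.getElem?_take, hi] using this
    rw [List.getD_eq_getElem _ _ hia, List.getD_eq_getElem _ _ hib]
    have := h2
    rw [List.getElem?_eq_getElem hia, List.getElem?_eq_getElem hib] at this
    exact Option.some.inj this
  · intro h
    apply List.ext_getElem
    · simp [Nat.min_eq_left ha, Nat.min_eq_left hb]
    · intro i hi1 hi2
      have hik : i < k := by simpa [Nat.min_eq_left ha] using hi1
      have hia : i < a.length := lt_of_lt_of_le hik ha
      have hib : i < b.length := lt_of_lt_of_le hik hb
      have := h i hik
      rw [List.getD_eq_getElem _ _ hia, List.getD_eq_getElem _ _ hib] at this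
      simpa [List.getElem_take] using this

-- the heart: greedy maximal prefix+suffix ≥ n2  ↔  some split point k works
lemma core (a b : List String) (hb : b.length ≤ a.length) :
    (decide (b.length ≤ pvWhilePrefix a b b.length 0 + pvWhileSuffix a b a.length b.length 0))
    = (List.range (b.length + 1)).any (fun k =>
        (a.take k == b.take k) && (a.drop (a.length - (b.length - k)) == b.drop k)) := by
  have hsuf := pvWhileSuffix_eq_rev a b hb b.length 0 (by omega)
  set n2 := b.length with hn2
  set na := a.length with hna
  set P := pvWhilePrefix a b n2 0 with hP
  have hPs := pvWhilePrefix_spec a b n2 (n2 + 1) 0 (by omega) (by omega)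
  set E := pvWhilePrefix a.reverse b.reverse n2 0 with hE
  have hEs := pvWhilePrefix_spec a.reverse b.reverse n2 (n2 + 1) 0 (by omega) (by omega)
  rw [hsuf]
  rw [Bool.eq_iff_iff]
  simp only [decide_eq_true_eq, List.any_eq_true, List.mem_range, Bool.and_eq_true, beq_iff_eq]
  have dropIff : ∀ k ≤ n2,
      (a.drop (na - (n2 - k)) = b.drop k ↔
        ∀ i < n2 - k, a.reverse.getD i "" = b.reverse.getD i "") := by
    intro k hk
    have h1 : a.drop (na - (n2 - k)) = b.drop k ↔
        (a.drop (na - (n2 - k))).reverse = (b.drop k).reverse := by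
      exact ⟨fun h => by rw [h], fun h => List.reverse_injective h⟩
    rw [h1, List.reverse_drop, List.reverse_drop, ← hna, ← hn2]
    have e1 : na - (na - (n2 - k)) = n2 - k := by omega
    have e2 : n2 - k ≤ a.reverse.length := by rw [List.length_reverse]; omega
    have e3 : n2 - k ≤ b.reverse.length := by rw [List.length_reverse]; omega
    rw [e1]
    exact take_eq_iff_getD _ _ _ e2 e3
  constructor
  · -- greedy ⇒ split point k = n2 - E
    intro h
    refine ⟨n2 - E, by omega, ?_, ?_⟩
    · rw [take_eq_iff_getD a b _ (by omega) (by omega)]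
      intro i hi
      exact hPs.2.2.1 i (by omega) (by omega)
    · rw [dropIff _ (by omega)]
      intro i hi
      exact hEs.2.2.1 i (by omega) (by omega)
  · -- split point ⇒ greedy: maximality of P and E
    rintro ⟨k, hk, htake, hdrop⟩
    have hk' : k ≤ n2 := by omega
    have hkP : k ≤ P := by
      by_contra hc
      push_neg at hc
      have hPn : P < n2 := lt_of_lt_of_le hc hk'
      exact hPs.2.2.2 hPn ((take_eq_iff_getD a b k (by omega) (by omega)).mp htake P hc)
    have hkE : n2 - k ≤ E := by
      by_contra hc
      push_neg at hc
      have hEn : E < n2 := by omega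
      exact hEs.2.2.2 hEn (((dropIff k hk').mp hdrop) E hc)
    omega

-- ===== VERDICT (by name: the statement is the Claim_ definition above) =====
theorem areSentencesSimilar_spec : Claim_equal_areSentencesSimilar := by
  intro s1 s2 _
  unfold Spec_areSentencesSimilar areSentencesSimilar areSentencesSimilar_alt
  simp only []
  set l1 := PySem.Str.split₀ s1
  set l2 := PySem.Str.split₀ s2
  by_cases h : l1.length < l2.length
  · have h2 : ¬ l2.length ≤ l1.length := by omega
    simp only [if_pos h, if_neg h2]
    exact core l2 l1 (by omega)
  · have h2 : l2.length ≤ l1.length := by omega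
    simp only [if_neg h, if_pos h2]
    exact core l1 l2 h2
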